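-- pv_equiv track=rewrite | github.com/saptar/learnPy | shopping_list.py | members
-- ===== SOURCE A (Python) =====
-- def members(my_dict,my_list):
--   # var to hold count
--   count = 0
--   # iterate over the list and try to find out the corresponding values for
--   # keys of the same name
--   for item in my_list:
--     try:
--         if my_dict[item] != None:
--           count +=1
--     except KeyError:
--       continue
--   return count
-- ===== SOURCE B (Python) =====
-- def members(my_dict, my_list):
--     # One pass to build a frequency table of the list, then one pass over the
--     # distinct items, adding each item's frequency when it is a dict key with
--     # a non-None value.
--     freq = {}
--     for item in my_list:
--         freq[item] = freq.get(item, 0) + 1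
--     total = 0
--     for item, f in freq.items():
--         if item in my_dict and my_dict[item] != None:
--             total += f
--     return total
-- ===== Notes on version B (the rewrite author's own statement) =====
-- stated objective: alternative
-- what changed: Replaces the per-element try/except membership loop by building a frequency table of the list once and summing the frequencies of the distinct items that are dict keys with non-None value.
import Mathlib
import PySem

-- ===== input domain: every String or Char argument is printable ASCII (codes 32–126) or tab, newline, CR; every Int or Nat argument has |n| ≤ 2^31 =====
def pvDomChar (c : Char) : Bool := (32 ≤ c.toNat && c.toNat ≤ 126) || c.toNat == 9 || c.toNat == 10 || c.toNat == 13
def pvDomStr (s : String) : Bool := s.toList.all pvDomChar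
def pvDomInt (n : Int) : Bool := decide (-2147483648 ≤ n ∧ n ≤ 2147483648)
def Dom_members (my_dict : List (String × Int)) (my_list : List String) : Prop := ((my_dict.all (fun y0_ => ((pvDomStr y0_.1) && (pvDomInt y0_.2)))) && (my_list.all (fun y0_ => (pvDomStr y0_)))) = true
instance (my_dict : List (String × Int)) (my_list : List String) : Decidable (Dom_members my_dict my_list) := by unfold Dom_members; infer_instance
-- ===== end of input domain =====

-- B replaces A's per-element try/except dict lookup loop by a frequency table
-- of the list summed over distinct items (alternative decomposition, same cost).

-- ===== PORT A =====
-- for item in my_list: try: if my_dict[item] != None: count += 1 except KeyError: continue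
-- (values are Int, never None, so the '!= None' test is true whenever the key exists)
def members (my_dict : List (String × Int)) (my_list : List String) : Int :=
  my_list.foldl (fun count item =>
    match (PySem.Dict.mk my_dict).get? item with
    | some _ => count + 1          -- value != None always holds for an Int value
    | none => count) 0             -- KeyError: continue

-- ===== PORT B =====
-- freq = {}; for item in my_list: freq[item] = freq.get(item, 0) + 1
-- total = 0; for item, f in freq.items(): if item in my_dict and my_dict[item] != None: total += f
def members_alt (my_dict : List (String × Int)) (my_list : List String) : Int :=
  (my_list.foldl (fun d x => d.insert x (d.getD x 0 + 1)) (PySem.Dict.empty : PySem.Dict String Int)).items.foldl (fun total p =>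
    if (PySem.Dict.mk my_dict).contains p.1 then total + p.2 else total) 0

-- ===== PRECONDITION & SPEC =====
def Spec_members (my_dict : List (String × Int)) (my_list : List String) (out : Int) : Prop := out = members_alt my_dict my_list
instance (my_dict : List (String × Int)) (my_list : List String) (out : Int) : Decidable (Spec_members my_dict my_list out) := by unfold Spec_members; infer_instance

-- ===== CLAIM (what is proved, stated in full; the proofs are below) =====
def Claim_equal_members : Prop := ∀ (my_dict : List (String × Int)) (my_list : List String), Dom_members my_dict my_list → Spec_members my_dict my_list (members my_dict my_list)

-- ===== LEMMAS AND PROOFS =====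

-- A's loop counts the elements whose lookup succeeds.
theorem members_loop_eq (d : PySem.Dict String Int) (l : List String) (n : Int) :
    l.foldl (fun count item => match d.get? item with | some _ => count + 1 | none => count) n
      = n + ((l.filter (fun x => (d.get? x).isSome)).length : Int) := by
  induction l generalizing n with
  | nil => simp
  | cons x l ih =>
    simp only [List.foldl_cons, List.filter_cons]
    cases h : d.get? x with
    | some v => simp [ih]; ring
    | none => simp [ih]

-- A conditional-accumulate foldl is the sum of a map.
theorem foldl_if_add (p : String → Bool) (f : String → Int) (s : List String) (a : Int) :
    s.foldl (fun t k => if p k then t + f k else t) a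
      = a + (s.map (fun k => if p k then f k else 0)).sum := by
  induction s generalizing a with
  | nil => simp
  | cons x s ih =>
    simp only [List.foldl_cons, List.map_cons, List.sum_cons]
    by_cases hp : p x <;> simp [hp, ih] <;> try ring

theorem sum_map_add (f g : String → Int) (s : List String) :
    (s.map (fun k => f k + g k)).sum = (s.map f).sum + (s.map g).sum := by
  induction s with
  | nil => simp
  | cons x s ih => simp [ih]; ring

theorem sum_delta_zero (p : String → Bool) (x : String) (s : List String) (hx : x ∉ s) :
    (s.map (fun k => if p k ∧ k = x then (1 : Int) else 0)).sum = 0 := by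
  induction s with
  | nil => simp
  | cons a s ih =>
    simp only [List.mem_cons, not_or] at hx
    simp [ih hx.2, Ne.symm hx.1]

theorem sum_delta (p : String → Bool) (x : String) (s : List String)
    (hs : s.Nodup) (hx : x ∈ s) :
    (s.map (fun k => if p k ∧ k = x then (1 : Int) else 0)).sum = if p x then 1 else 0 := by
  induction s with
  | nil => simp at hx
  | cons a s ih =>
    simp only [List.map_cons, List.sum_cons]
    rcases List.mem_cons.mp hx with h | h
    · subst h
      rw [sum_delta_zero p x s (List.nodup_cons.mp hs).1]
      by_cases hp : p x <;> simp [hp]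
    · have hax : a ≠ x := by
        rintro rfl; exact (List.nodup_cons.mp hs).1 h
      simp [hax, ih (List.nodup_cons.mp hs).2 h]

-- Summing each distinct item's multiplicity under a predicate counts the filtered list.
theorem sum_count (p : String → Bool) (l s : List String)
    (hs : s.Nodup) (hsub : ∀ x ∈ l, x ∈ s) :
    (s.map (fun k => if p k then (l.count k : Int) else 0)).sum
      = ((l.filter p).length : Int) := by
  induction l with
  | nil => simp [List.sum_eq_zero]
  | cons x l ih =>
    have hterm : ∀ k, (if p k then (((x :: l).count k : Nat) : Int) else 0)
        = (if p k then (l.count k : Int) else 0) + (if p k ∧ k = x then 1 else 0) := by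
      intro k
      by_cases hp : p k
      · by_cases hk : x = k
        · subst hk; simp [hp]
        · simp [hp, hk, Ne.symm hk]
      · simp [hp]
    calc (s.map (fun k => if p k then ((x :: l).count k : Int) else 0)).sum
        = (s.map (fun k => (if p k then (l.count k : Int) else 0)
              + (if p k ∧ k = x then 1 else 0))).sum := by
          congr 1; exact List.map_congr_left (fun k _ => hterm k)
      _ = (s.map (fun k => if p k then (l.count k : Int) else 0)).sum
              + (s.map (fun k => if p k ∧ k = x then (1 : Int) else 0)).sum := sum_map_add _ _ s
      _ = ((l.filter p).length : Int) + (if p x then 1 else 0) := by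
          rw [ih (fun y hy => hsub y (List.mem_cons_of_mem x hy)),
              sum_delta p x s hs (hsub x List.mem_cons_self)]
      _ = (((x :: l).filter p).length : Int) := by
          by_cases hp : p x <;> simp [hp]

theorem members_spec : Claim_equal_members := by
  intro my_dict my_list _
  unfold Spec_members members members_alt
  rw [PySem.Dict.foldl_insert_getD_add_one_eq_counter]
  set d := PySem.Dict.mk my_dict with hd
  set p : String → Bool := fun x => (d.get? x).isSome with hp
  rw [PySem.Dict.items_counter, List.foldl_map, members_loop_eq d my_list 0,
      foldl_if_add (fun k => d.contains k) (fun k => (my_list.count k : Int)) _ 0]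
  have hpc : ∀ k, d.contains k = p k := fun k => PySem.Dict.contains_eq_isSome_get? d k
  have : ((PySem.Set.ofList my_list : List String).map
      (fun k => if d.contains k then (my_list.count k : Int) else 0)).sum
      = ((my_list.filter p).length : Int) := by
    rw [List.map_congr_left (fun k _ => by rw [hpc k])]
    exact sum_count p my_list _ (PySem.Set.nodup_ofList my_list)
      (fun x hx => (PySem.Set.mem_ofList my_list x).mpr hx)
  rw [this]
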